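-- pv_equiv track=rewrite | github.com/martinosecchi/practice-exercises | remove_islands.py | remove_islands
-- ===== SOURCE A (Python) =====
-- from typing import List
--
-- Matrix = List[List[int]]
--
-- def remove_islands(matrix: Matrix) -> Matrix:
--     # 0 -> white
--     # 1 -> black
--     # remove all "islands" of black pixels if the island is not connected to the border
--     n = len(matrix)
--     m = len(matrix[0]) if n else 0
--     visited = [[False for j in range(m)] for i in range(n)]
--     for i in range(n):
--         for j in range(m):
--             if matrix[i][j] == 1 and not visited[i][j] and not is_connected_to_border(matrix, i, j, visited):
--                 matrix = remove_island_at(matrix, i, j)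
--     return matrix
--
-- def is_connected_to_border(matrix: Matrix, i: int, j: int, visited: Matrix) -> bool:
--     n = len(matrix)
--     m = len(matrix[0]) if n else 0
--
--     i_out_of_bound = i < 0 or i >= n
--     j_out_of_bound = j < 0 or j >= m
--     if i_out_of_bound or j_out_of_bound or matrix[i][j] == 0 or visited[i][j]:
--         return False
--
--     visited[i][j] = True
--     is_border = i == 0 or i == n - 1 or j == 0 or j == m - 1
--     # evaluate all direction to fill up `visited`
--     connected_up = is_connected_to_border(matrix, i - 1, j, visited)
--     connected_down = is_connected_to_border(matrix, i + 1, j, visited)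
--     connected_left = is_connected_to_border(matrix, i, j - 1, visited)
--     connected_right = is_connected_to_border(matrix, i, j + 1, visited)
--     return (
--         is_border or
--         connected_up or
--         connected_down or
--         connected_right or
--         connected_left
--     )
--
-- def remove_island_at(matrix: Matrix, i: int, j: int) -> Matrix:
--     n = len(matrix)
--     m = len(matrix[0]) if n else 0
--
--     i_out_of_bound = i < 0 or i >= n
--     j_out_of_bound = j < 0 or j >= m
--     if i_out_of_bound or j_out_of_bound or matrix[i][j] == 0:
--         return matrix
--
--     matrix[i][j] = 0
--     remove_island_at(matrix, i - 1, j)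
--     remove_island_at(matrix, i + 1, j)
--     remove_island_at(matrix, i, j - 1)
--     remove_island_at(matrix, i, j + 1)
--     return matrix
-- ===== SOURCE B (Python) =====
-- def remove_islands(matrix):
--     n = len(matrix)
--     m = len(matrix[0]) if n else 0
--     visited = [[False] * m for _ in range(n)]
--     for i in range(n):
--         for j in range(m):
--             if matrix[i][j] == 1 and not visited[i][j]:
--                 connected = False
--                 stack = [(i, j)]
--                 while stack:
--                     a, b = stack.pop()
--                     if a < 0 or a >= n or b < 0 or b >= m or matrix[a][b] == 0 or visited[a][b]:
--                         continue
--                     visited[a][b] = True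
--                     if a == 0 or a == n - 1 or b == 0 or b == m - 1:
--                         connected = True
--                     stack.extend(((a, b + 1), (a, b - 1), (a + 1, b), (a - 1, b)))
--                 if not connected:
--                     stack = [(i, j)]
--                     while stack:
--                         a, b = stack.pop()
--                         if a < 0 or a >= n or b < 0 or b >= m or matrix[a][b] == 0:
--                             continue
--                         matrix[a][b] = 0
--                         stack.extend(((a, b + 1), (a, b - 1), (a + 1, b), (a - 1, b)))
--     return matrix
-- ===== Notes on version B (the rewrite author's own statement) =====
-- stated objective: alternative
-- what changed: Replaces A's two mutually-threaded recursive flood-fill helpers (recursive border check + recursive removal) by iterative explicit-stack flood fills inlined into the scan loop, avoiding Python recursion and its depth limit.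
import Mathlib
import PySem

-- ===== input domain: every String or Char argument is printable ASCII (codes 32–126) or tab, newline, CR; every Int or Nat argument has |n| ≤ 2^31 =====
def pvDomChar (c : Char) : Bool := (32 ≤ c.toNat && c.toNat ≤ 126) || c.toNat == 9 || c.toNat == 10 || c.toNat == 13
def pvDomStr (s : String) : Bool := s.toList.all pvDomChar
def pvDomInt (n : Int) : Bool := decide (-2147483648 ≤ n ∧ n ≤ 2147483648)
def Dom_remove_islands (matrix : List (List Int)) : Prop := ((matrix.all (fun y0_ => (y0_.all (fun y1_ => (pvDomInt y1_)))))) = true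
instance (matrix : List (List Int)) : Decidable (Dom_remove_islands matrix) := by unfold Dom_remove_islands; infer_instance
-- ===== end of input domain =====

-- B replaces A's recursive flood fills by explicit-stack iterative flood fills (no Python recursion);
-- both A and B mutate `matrix` in place the same way and return it (equivalence is about the return value).

-- ===== PORT A =====
-- shared grid primitives (used by both ports): dimensions, cell read, cell write
def pyDims (mat : List (List Int)) : Int × Int :=
  ((mat.length : Int), if mat.length = 0 then 0 else ((mat.headD []).length : Int))

-- matrix[i][j] for 0 ≤ i, j; both Pythons read it only after their bounds guards
def cellAt (mat : List (List Int)) (i j : Int) : Int :=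
  ((mat.getD i.toNat []).getD j.toNat 0)

-- matrix[i][j] = v
def setCell (mat : List (List Int)) (i j : Int) (v : Int) : List (List Int) :=
  mat.set i.toNat ((mat.getD i.toNat []).set j.toNat v)

-- the index window of an n×m grid, and the termination measures of the flood fills
def window (n m : Int) : Finset (Int × Int) :=
  ((List.range n.toNat).flatMap (fun i => (List.range m.toNat).map (fun j => ((i : Int), (j : Int))))).toFinset

def visMeas (n m : Int) (vis : Finset (Int × Int)) : Nat := (window n m \ vis).card

def nzNM (n m : Int) (mat : List (List Int)) : Nat :=
  ((window n m).filter (fun p => cellAt mat p.1 p.2 ≠ 0)).card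

def nzMeasA (mat : List (List Int)) : Nat := nzNM (pyDims mat).1 (pyDims mat).2 mat

lemma mem_window {n m i j : Int} :
    (i, j) ∈ window n m ↔ (0 ≤ i ∧ i ≤ n - 1) ∧ (0 ≤ j ∧ j ≤ m - 1) := by
  simp [window, Prod.ext_iff]
  constructor
  · rintro ⟨⟨a, ha, rfl⟩, ⟨b, hb, rfl⟩⟩
    omega
  · rintro ⟨⟨h1, h2⟩, h3, h4⟩
    exact ⟨⟨i.toNat, by omega, by omega⟩, ⟨j.toNat, by omega, by omega⟩⟩

lemma visMeas_insert_lt {n m : Int} {p : Int × Int} {vis : Finset (Int × Int)}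
    (hp : p ∈ window n m) (hv : p ∉ vis) :
    visMeas n m (insert p vis) < visMeas n m vis := by
  have h : window n m \ insert p vis = (window n m \ vis).erase p := by
    ext q; simp only [Finset.mem_sdiff, Finset.mem_erase, Finset.mem_insert]; tauto
  unfold visMeas
  rw [h]
  exact Finset.card_erase_lt_of_mem (Finset.mem_sdiff.2 ⟨hp, hv⟩)

lemma cellAt_ne_zero_ranges {mat : List (List Int)} {i j : Int}
    (h : cellAt mat i j ≠ 0) :
    i.toNat < mat.length ∧ j.toNat < (mat.getD i.toNat []).length := by
  unfold cellAt at h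
  constructor
  · by_contra hc
    rw [List.getD_eq_default _ _ (Nat.le_of_not_lt hc)] at h
    simp [List.getD] at h
  · by_contra hc
    rw [List.getD_eq_default _ _ (Nat.le_of_not_lt hc)] at h
    exact h rfl

lemma getD_set_self {α : Type} (l : List α) (n : Nat) (a d : α) (h : n < l.length) :
    (l.set n a).getD n d = a := by
  induction l generalizing n with
  | nil => simp at h
  | cons x t ih =>
    cases n with
    | zero => simp
    | succ k => simpa using ih k (by simpa using h)

lemma getD_set_ne {α : Type} (l : List α) (n n' : Nat) (a d : α) (h : n ≠ n') :
    (l.set n a).getD n' d = l.getD n' d := by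
  induction l generalizing n n' with
  | nil => simp
  | cons x t ih =>
    cases n with
    | zero =>
      cases n' with
      | zero => omega
      | succ k' => simp
    | succ k =>
      cases n' with
      | zero => simp
      | succ k' => simpa using ih k k' (by omega)

lemma set_oob {α : Type} (l : List α) (n : Nat) (a : α) (h : l.length ≤ n) :
    l.set n a = l := by
  induction l generalizing n with
  | nil => simp
  | cons x t ih =>
    cases n with
    | zero => simp at h
    | succ k => simpa using ih k (by simpa using h)

lemma cellAt_setCell_self {mat : List (List Int)} {i j : Int} (v : Int)
    (h : cellAt mat i j ≠ 0) :
    cellAt (setCell mat i j v) i j = v := by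
  obtain ⟨hi, hj⟩ := cellAt_ne_zero_ranges h
  unfold cellAt setCell
  rw [getD_set_self _ _ _ _ hi, getD_set_self _ _ _ _ hj]

lemma cellAt_setCell_ne {mat : List (List Int)} {i j i' j' : Int} (v : Int)
    (hi : 0 ≤ i) (hj : 0 ≤ j) (hi' : 0 ≤ i') (hj' : 0 ≤ j')
    (hne : (i', j') ≠ (i, j)) :
    cellAt (setCell mat i j v) i' j' = cellAt mat i' j' := by
  unfold cellAt setCell
  by_cases hii : i' = i
  · subst hii
    have hjj : j' ≠ j := by intro h; exact hne (by rw [h])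
    by_cases hlen : i'.toNat < mat.length
    · rw [getD_set_self _ _ _ _ hlen, getD_set_ne _ _ _ _ _ (by omega)]
    · rw [set_oob _ _ _ (Nat.le_of_not_lt hlen)]
  · rw [getD_set_ne _ _ _ _ _ (by omega)]

lemma nzNM_set_lt {n m : Int} {mat : List (List Int)} {i j : Int}
    (hi0 : 0 ≤ i) (hin : i ≤ n - 1) (hj0 : 0 ≤ j) (hjm : j ≤ m - 1)
    (hz : cellAt mat i j ≠ 0) :
    nzNM n m (setCell mat i j 0) < nzNM n m mat := by
  unfold nzNM
  apply Finset.card_lt_card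
  constructor
  · intro p hp
    rw [Finset.mem_filter] at hp ⊢
    obtain ⟨hw, hc⟩ := hp
    refine ⟨hw, ?_⟩
    obtain ⟨p1, p2⟩ := p
    obtain ⟨⟨h1, _⟩, ⟨h2, _⟩⟩ := mem_window.1 hw
    by_cases hpe : (p1, p2) = (i, j)
    · exfalso; apply hc
      obtain ⟨e1, e2⟩ := Prod.mk.injEq .. ▸ hpe
      subst e1; subst e2
      exact cellAt_setCell_self 0 hz
    · rwa [cellAt_setCell_ne 0 hi0 hj0 h1 h2 hpe] at hc
  · intro hsub
    have hmem : (i, j) ∈ (window n m).filter (fun p => cellAt mat p.1 p.2 ≠ 0) :=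
      Finset.mem_filter.2 ⟨mem_window.2 ⟨⟨hi0, hin⟩, ⟨hj0, hjm⟩⟩, hz⟩
    have := Finset.mem_filter.1 (hsub hmem)
    exact this.2 (cellAt_setCell_self 0 hz)

lemma pyDims_setCell (mat : List (List Int)) (i j v : Int) :
    pyDims (setCell mat i j v) = pyDims mat := by
  unfold pyDims setCell
  cases mat with
  | nil => simp
  | cons a t =>
    cases hi : i.toNat with
    | zero => simp [List.set]
    | succ k => simp [List.set]

lemma nzMeasA_set_lt {mat : List (List Int)} {i j : Int}
    (hi0 : 0 ≤ i) (hin : i ≤ (pyDims mat).1 - 1) (hj0 : 0 ≤ j) (hjm : j ≤ (pyDims mat).2 - 1)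
    (hz : cellAt mat i j ≠ 0) :
    nzMeasA (setCell mat i j 0) < nzMeasA mat := by
  unfold nzMeasA
  rw [pyDims_setCell]
  exact nzNM_set_lt hi0 hin hj0 hjm hz

-- port of A's `is_connected_to_border` (the visited boolean matrix is represented as the
-- finite set of coordinates holding True; it is only read/written inside the bounds guard,
-- where the two representations coincide).  Returns the Bool and the updated visited set,
-- bundled with the monotonicity fact needed for termination.
def goA (mat : List (List Int)) (i j : Int) (vis : Finset (Int × Int)) :
    {r : Bool × Finset (Int × Int) //
      visMeas (pyDims mat).1 (pyDims mat).2 r.2 ≤ visMeas (pyDims mat).1 (pyDims mat).2 vis} :=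
  if h : i < 0 ∨ (pyDims mat).1 ≤ i ∨ j < 0 ∨ (pyDims mat).2 ≤ j ∨
         cellAt mat i j = 0 ∨ (i, j) ∈ vis then
    ⟨(false, vis), le_refl _⟩
  else
    have hkey : visMeas (pyDims mat).1 (pyDims mat).2 (insert (i, j) vis) <
        visMeas (pyDims mat).1 (pyDims mat).2 vis := by
      rcases not_or.mp h with ⟨h1, h25⟩
      rcases not_or.mp h25 with ⟨h2, h35⟩
      rcases not_or.mp h35 with ⟨h3, h45⟩
      rcases not_or.mp h45 with ⟨h4, h56⟩
      rcases not_or.mp h56 with ⟨h5, h6⟩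
      exact visMeas_insert_lt (mem_window.2 (by omega)) h6
    let vis0 := insert (i, j) vis
    let isBorder : Bool :=
      decide (i = 0 ∨ i = (pyDims mat).1 - 1 ∨ j = 0 ∨ j = (pyDims mat).2 - 1)
    let u := goA mat (i - 1) j vis0
    let d := goA mat (i + 1) j u.1.2
    let l := goA mat i (j - 1) d.1.2
    let r := goA mat i (j + 1) l.1.2
    ⟨(isBorder || u.1.1 || d.1.1 || r.1.1 || l.1.1, r.1.2),
      le_trans r.2 (le_trans l.2 (le_trans d.2 (le_trans u.2 (le_of_lt hkey))))⟩
termination_by visMeas (pyDims mat).1 (pyDims mat).2 vis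
decreasing_by
  · exact hkey
  · exact lt_of_le_of_lt u.2 hkey
  · exact lt_of_le_of_lt (le_trans d.2 u.2) hkey
  · exact lt_of_le_of_lt (le_trans l.2 (le_trans d.2 u.2)) hkey

-- port of A's `remove_island_at` (mutation of `matrix` is threaded through the calls,
-- exactly in Python's evaluation order), bundled with the fact needed for termination
def goRemove (mat : List (List Int)) (i j : Int) :
    {g : List (List Int) // nzMeasA g ≤ nzMeasA mat} :=
  if h : i < 0 ∨ (pyDims mat).1 ≤ i ∨ j < 0 ∨ (pyDims mat).2 ≤ j ∨ cellAt mat i j = 0 then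
    ⟨mat, le_refl _⟩
  else
    have hkey : nzMeasA (setCell mat i j 0) < nzMeasA mat := by
      rcases not_or.mp h with ⟨h1, h25⟩
      rcases not_or.mp h25 with ⟨h2, h35⟩
      rcases not_or.mp h35 with ⟨h3, h45⟩
      rcases not_or.mp h45 with ⟨h4, h5⟩
      exact nzMeasA_set_lt (by omega) (by omega) (by omega) (by omega) h5
    let mat0 := setCell mat i j 0
    let u := goRemove mat0 (i - 1) j
    let d := goRemove u.1 (i + 1) j
    let l := goRemove d.1 i (j - 1)
    let r := goRemove l.1 i (j + 1)
    ⟨r.1, le_trans r.2 (le_trans l.2 (le_trans d.2 (le_trans u.2 (le_of_lt hkey))))⟩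
termination_by nzMeasA mat
decreasing_by
  · exact hkey
  · exact lt_of_le_of_lt u.2 hkey
  · exact lt_of_le_of_lt (le_trans d.2 u.2) hkey
  · exact lt_of_le_of_lt (le_trans l.2 (le_trans d.2 u.2)) hkey

-- the row-major scan `for i in range(n): for j in range(m)` shared by both Pythons
def idxList (n m : Int) : List (Int × Int) :=
  (List.range n.toNat).flatMap (fun i => (List.range m.toNat).map (fun j => ((i : Int), (j : Int))))

-- one iteration of A's scan body
def stepA (st : List (List Int) × Finset (Int × Int)) (ij : Int × Int) :
    List (List Int) × Finset (Int × Int) :=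
  if cellAt st.1 ij.1 ij.2 = 1 ∧ ij ∉ st.2 then
    let r := goA st.1 ij.1 ij.2 st.2
    if r.1.1 then (st.1, r.1.2) else ((goRemove st.1 ij.1 ij.2).1, r.1.2)
  else st

def remove_islands (matrix : List (List Int)) : List (List Int) :=
  ((idxList (pyDims matrix).1 (pyDims matrix).2).foldl stepA (matrix, (∅ : Finset (Int × Int)))).1

-- ===== PORT B =====
-- B's first while loop: explicit-stack flood fill marking the component and
-- accumulating the `connected` flag (stack top = list head)
def floodB (mat : List (List Int)) (n m : Int) (vis : Finset (Int × Int))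
    (stack : List (Int × Int)) (conn : Bool) : Bool × Finset (Int × Int) :=
  match stack with
  | [] => (conn, vis)
  | (a, b) :: rest =>
    if a < 0 ∨ n ≤ a ∨ b < 0 ∨ m ≤ b ∨ cellAt mat a b = 0 ∨ (a, b) ∈ vis then
      floodB mat n m vis rest conn
    else
      floodB mat n m (insert (a, b) vis)
        ((a - 1, b) :: (a + 1, b) :: (a, b - 1) :: (a, b + 1) :: rest)
        (conn || decide (a = 0 ∨ a = n - 1 ∨ b = 0 ∨ b = m - 1))
termination_by (visMeas n m vis, stack.length)
decreasing_by
  · exact Prod.Lex.right _ (by simp)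
  · rename_i h
    apply Prod.Lex.left
    rcases not_or.mp h with ⟨h1, h25⟩
    rcases not_or.mp h25 with ⟨h2, h35⟩
    rcases not_or.mp h35 with ⟨h3, h45⟩
    rcases not_or.mp h45 with ⟨h4, h56⟩
    rcases not_or.mp h56 with ⟨h5, h6⟩
    exact visMeas_insert_lt (mem_window.2 (by omega)) h6

-- B's second while loop: explicit-stack flood fill zeroing the component
def drainB (mat : List (List Int)) (n m : Int) (stack : List (Int × Int)) : List (List Int) :=
  match stack with
  | [] => mat
  | (a, b) :: rest =>
    if a < 0 ∨ n ≤ a ∨ b < 0 ∨ m ≤ b ∨ cellAt mat a b = 0 then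
      drainB mat n m rest
    else
      drainB (setCell mat a b 0) n m
        ((a - 1, b) :: (a + 1, b) :: (a, b - 1) :: (a, b + 1) :: rest)
termination_by (nzNM n m mat, stack.length)
decreasing_by
  · exact Prod.Lex.right _ (by simp)
  · rename_i h
    apply Prod.Lex.left
    rcases not_or.mp h with ⟨h1, h25⟩
    rcases not_or.mp h25 with ⟨h2, h35⟩
    rcases not_or.mp h35 with ⟨h3, h45⟩
    rcases not_or.mp h45 with ⟨h4, h5⟩
    exact nzNM_set_lt (by omega) (by omega) (by omega) (by omega) h5

-- one iteration of B's scan body (n, m computed once, as in Source B)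
def stepB (n m : Int) (st : List (List Int) × Finset (Int × Int)) (ij : Int × Int) :
    List (List Int) × Finset (Int × Int) :=
  if cellAt st.1 ij.1 ij.2 = 1 ∧ ij ∉ st.2 then
    let r := floodB st.1 n m st.2 [ij] false
    if r.1 then (st.1, r.2) else (drainB st.1 n m [ij], r.2)
  else st

def remove_islands_alt (matrix : List (List Int)) : List (List Int) :=
  ((idxList (pyDims matrix).1 (pyDims matrix).2).foldl
      (stepB (pyDims matrix).1 (pyDims matrix).2) (matrix, (∅ : Finset (Int × Int)))).1

-- ===== PRECONDITION & SPEC =====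
-- Pre_ excludes exactly the ragged matrices with some row shorter than row 0, on which the
-- Python A raises IndexError (it reads matrix[i][j] for every j < len(matrix[0])).
def Pre_remove_islands (matrix : List (List Int)) : Prop :=
  ∀ row ∈ matrix, (matrix.headD []).length ≤ row.length
instance (matrix : List (List Int)) : Decidable (Pre_remove_islands matrix) := by
  unfold Pre_remove_islands; infer_instance

def pvWitness_remove_islands : List (List Int) := [[1, 0, 0], [0, 1, 0], [0, 0, 0]]

def Spec_remove_islands (matrix : List (List Int)) (out : List (List Int)) : Prop := out = remove_islands_alt matrix
instance (matrix : List (List Int)) (out : List (List Int)) : Decidable (Spec_remove_islands matrix out) := by unfold Spec_remove_islands; infer_instance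

-- ===== CLAIM (what is proved, stated in full; the proofs are below) =====
def Claim_equal_remove_islands : Prop := ∀ (matrix : List (List Int)), Dom_remove_islands matrix → Pre_remove_islands matrix → Spec_remove_islands matrix (remove_islands matrix)

-- ===== LEMMAS AND PROOFS =====

lemma goRemove_dims (mat : List (List Int)) (i j : Int) :
    pyDims (goRemove mat i j).1 = pyDims mat := by
  fun_induction goRemove mat i j with
  | case1 mat i j h => rfl
  | case2 mat i j h hkey mat0 u d l r ih1 ih2 ih3 ih4 ih5 ih6 ih7 ih8 =>
    dsimp only
    simp only [r, l, d, u, mat0] at ih1 ih2 ih3 ih4 ih5 ih6 ih7 ih8 ⊢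
    simp only [ih1, ih2, ih3, ih4, ih5, ih6, ih7, pyDims_setCell]

lemma goRemove_nz {n m : Int} (mat : List (List Int)) (i j : Int)
    (hd : pyDims mat = (n, m)) :
    nzNM n m (goRemove mat i j).1 ≤ nzNM n m mat := by
  have hdim := goRemove_dims mat i j
  cases hgr : goRemove mat i j with
  | mk g hgle =>
    rw [hgr] at hdim
    dsimp only at hdim ⊢
    unfold nzMeasA at hgle
    have hdg : pyDims g = (n, m) := by rw [hdim, hd]
    rw [hdg, hd] at hgle
    simpa using hgle

set_option maxHeartbeats 1000000 in
lemma flood_bisim (mat : List (List Int)) :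
    ∀ (k : Nat) (vis : Finset (Int × Int)) (i j : Int) (rest : List (Int × Int)) (conn : Bool),
      visMeas (pyDims mat).1 (pyDims mat).2 vis ≤ k →
      floodB mat (pyDims mat).1 (pyDims mat).2 vis ((i, j) :: rest) conn =
        floodB mat (pyDims mat).1 (pyDims mat).2 (goA mat i j vis).1.2 rest
          (conn || (goA mat i j vis).1.1) := by
  intro k
  induction k with
  | zero =>
    intro vis i j rest conn hle
    by_cases hg : i < 0 ∨ (pyDims mat).1 ≤ i ∨ j < 0 ∨ (pyDims mat).2 ≤ j ∨
        cellAt mat i j = 0 ∨ (i, j) ∈ vis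
    · rw [goA.eq_def, dif_pos hg]
      rw [floodB.eq_2, if_pos hg]
      simp
    · exfalso
      rcases not_or.mp hg with ⟨h1, h25⟩
      rcases not_or.mp h25 with ⟨h2, h35⟩
      rcases not_or.mp h35 with ⟨h3, h45⟩
      rcases not_or.mp h45 with ⟨h4, h56⟩
      rcases not_or.mp h56 with ⟨h5, h6⟩
      have := visMeas_insert_lt (n := (pyDims mat).1) (m := (pyDims mat).2)
        (mem_window.2 (by omega)) h6
      omega
  | succ k ih =>
    intro vis i j rest conn hle
    by_cases hg : i < 0 ∨ (pyDims mat).1 ≤ i ∨ j < 0 ∨ (pyDims mat).2 ≤ j ∨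
        cellAt mat i j = 0 ∨ (i, j) ∈ vis
    · rw [goA.eq_def, dif_pos hg]
      rw [floodB.eq_2, if_pos hg]
      simp
    · have hlt : visMeas (pyDims mat).1 (pyDims mat).2 (insert (i, j) vis) <
          visMeas (pyDims mat).1 (pyDims mat).2 vis := by
        rcases not_or.mp hg with ⟨h1, h25⟩
        rcases not_or.mp h25 with ⟨h2, h35⟩
        rcases not_or.mp h35 with ⟨h3, h45⟩
        rcases not_or.mp h45 with ⟨h4, h56⟩
        rcases not_or.mp h56 with ⟨h5, h6⟩
        exact visMeas_insert_lt (mem_window.2 (by omega)) h6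
      have h0 : visMeas (pyDims mat).1 (pyDims mat).2 (insert (i, j) vis) ≤ k := by omega
      have h1 : visMeas (pyDims mat).1 (pyDims mat).2
          (goA mat (i - 1) j (insert (i, j) vis)).1.2 ≤ k :=
        le_trans (goA mat (i - 1) j (insert (i, j) vis)).2 h0
      have h2 : visMeas (pyDims mat).1 (pyDims mat).2
          (goA mat (i + 1) j (goA mat (i - 1) j (insert (i, j) vis)).1.2).1.2 ≤ k :=
        le_trans (goA mat (i + 1) j _).2 h1
      have h3 : visMeas (pyDims mat).1 (pyDims mat).2
          (goA mat i (j - 1) (goA mat (i + 1) j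
            (goA mat (i - 1) j (insert (i, j) vis)).1.2).1.2).1.2 ≤ k :=
        le_trans (goA mat i (j - 1) _).2 h2
      rw [floodB.eq_2, if_neg hg]
      rw [ih _ _ _ _ _ h0, ih _ _ _ _ _ h1, ih _ _ _ _ _ h2, ih _ _ _ _ _ h3]
      conv_rhs => rw [goA.eq_def]
      rw [dif_neg hg]
      dsimp only
      generalize (goA mat (i - 1) j (insert (i, j) vis)).1.1 = bu
      generalize (goA mat (i + 1) j (goA mat (i - 1) j (insert (i, j) vis)).1.2).1.1 = bd
      generalize (goA mat i (j - 1) (goA mat (i + 1) j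
        (goA mat (i - 1) j (insert (i, j) vis)).1.2).1.2).1.1 = bl
      generalize (goA mat i (j + 1) (goA mat i (j - 1) (goA mat (i + 1) j
        (goA mat (i - 1) j (insert (i, j) vis)).1.2).1.2).1.2).1.1 = br
      generalize decide (i = 0 ∨ i = (pyDims mat).1 - 1 ∨ j = 0 ∨ j = (pyDims mat).2 - 1) = bB
      congr 1
      cases conn <;> cases bB <;> cases bu <;> cases bd <;> cases bl <;> cases br <;> rfl

set_option maxHeartbeats 1000000 in
lemma drain_bisim {n m : Int} :
    ∀ (k : Nat) (mat : List (List Int)) (i j : Int) (rest : List (Int × Int)),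
      nzNM n m mat ≤ k → pyDims mat = (n, m) →
      drainB mat n m ((i, j) :: rest) = drainB (goRemove mat i j).1 n m rest := by
  intro k
  induction k with
  | zero =>
    intro mat i j rest hle hd
    by_cases hg : i < 0 ∨ n ≤ i ∨ j < 0 ∨ m ≤ j ∨ cellAt mat i j = 0
    · rw [goRemove.eq_def, dif_pos (by rw [hd]; simpa using hg)]
      rw [drainB.eq_2, if_pos hg]
    · exfalso
      rcases not_or.mp hg with ⟨h1, h25⟩
      rcases not_or.mp h25 with ⟨h2, h35⟩
      rcases not_or.mp h35 with ⟨h3, h45⟩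
      rcases not_or.mp h45 with ⟨h4, h5⟩
      have := nzNM_set_lt (n := n) (m := m) (mat := mat) (by omega) (by omega)
        (by omega) (by omega) h5
      omega
  | succ k ih =>
    intro mat i j rest hle hd
    by_cases hg : i < 0 ∨ n ≤ i ∨ j < 0 ∨ m ≤ j ∨ cellAt mat i j = 0
    · rw [goRemove.eq_def, dif_pos (by rw [hd]; simpa using hg)]
      rw [drainB.eq_2, if_pos hg]
    · have hlt : nzNM n m (setCell mat i j 0) < nzNM n m mat := by
        rcases not_or.mp hg with ⟨h1, h25⟩
        rcases not_or.mp h25 with ⟨h2, h35⟩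
        rcases not_or.mp h35 with ⟨h3, h45⟩
        rcases not_or.mp h45 with ⟨h4, h5⟩
        exact nzNM_set_lt (by omega) (by omega) (by omega) (by omega) h5
      have hd0 : pyDims (setCell mat i j 0) = (n, m) := by rw [pyDims_setCell, hd]
      have h0 : nzNM n m (setCell mat i j 0) ≤ k := by omega
      have hdu : pyDims (goRemove (setCell mat i j 0) (i - 1) j).1 = (n, m) := by
        rw [goRemove_dims]; exact hd0
      have hu : nzNM n m (goRemove (setCell mat i j 0) (i - 1) j).1 ≤ k :=
        le_trans (goRemove_nz _ _ _ hd0) h0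
      have hdd : pyDims (goRemove (goRemove (setCell mat i j 0) (i - 1) j).1 (i + 1) j).1
          = (n, m) := by rw [goRemove_dims]; exact hdu
      have h2 : nzNM n m (goRemove (goRemove (setCell mat i j 0) (i - 1) j).1 (i + 1) j).1
          ≤ k := le_trans (goRemove_nz _ _ _ hdu) hu
      have hdl : pyDims (goRemove (goRemove (goRemove (setCell mat i j 0) (i - 1) j).1
          (i + 1) j).1 i (j - 1)).1 = (n, m) := by rw [goRemove_dims]; exact hdd
      have h3 : nzNM n m (goRemove (goRemove (goRemove (setCell mat i j 0) (i - 1) j).1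
          (i + 1) j).1 i (j - 1)).1 ≤ k := le_trans (goRemove_nz _ _ _ hdd) h2
      rw [drainB.eq_2, if_neg hg]
      rw [ih _ _ _ _ h0 hd0, ih _ _ _ _ hu hdu, ih _ _ _ _ h2 hdd, ih _ _ _ _ h3 hdl]
      conv_rhs => rw [goRemove.eq_def]
      rw [dif_neg (by rw [hd]; simpa using hg)]

set_option maxHeartbeats 1000000 in
lemma step_eq {n m : Int} (st : List (List Int) × Finset (Int × Int)) (ij : Int × Int)
    (hd : pyDims st.1 = (n, m)) : stepA st ij = stepB n m st ij := by
  obtain ⟨i, j⟩ := ij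
  have hn : n = (pyDims st.1).1 := by rw [hd]
  have hm : m = (pyDims st.1).2 := by rw [hd]
  subst hn
  subst hm
  unfold stepA stepB
  by_cases hc : cellAt st.1 i j = 1 ∧ ((i, j) : Int × Int) ∉ st.2
  · rw [if_pos hc, if_pos hc]
    dsimp only
    have hf : floodB st.1 (pyDims st.1).1 (pyDims st.1).2 st.2 [(i, j)] false =
        ((goA st.1 i j st.2).1.1, (goA st.1 i j st.2).1.2) := by
      rw [flood_bisim st.1 (visMeas (pyDims st.1).1 (pyDims st.1).2 st.2) st.2 i j []
        false (le_refl _)]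
      rw [floodB.eq_1]
      simp
    have hr : drainB st.1 (pyDims st.1).1 (pyDims st.1).2 [(i, j)] = (goRemove st.1 i j).1 := by
      rw [drain_bisim (nzNM (pyDims st.1).1 (pyDims st.1).2 st.1) st.1 i j [] (le_refl _) rfl]
      rw [drainB.eq_1]
    rw [hf]
    dsimp only
    by_cases hb : (goA st.1 i j st.2).1.1 = true
    · rw [if_pos hb, if_pos hb]
    · rw [if_neg hb, if_neg hb, hr]
  · rw [if_neg hc, if_neg hc]

lemma stepA_dims (st : List (List Int) × Finset (Int × Int)) (ij : Int × Int) :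
    pyDims (stepA st ij).1 = pyDims st.1 := by
  unfold stepA
  by_cases hc : cellAt st.1 ij.1 ij.2 = 1 ∧ ij ∉ st.2
  · rw [if_pos hc]
    dsimp only
    by_cases hb : (goA st.1 ij.1 ij.2 st.2).1.1 = true
    · rw [if_pos hb]
    · rw [if_neg hb]
      dsimp only
      exact goRemove_dims st.1 ij.1 ij.2
  · rw [if_neg hc]

lemma fold_eq {n m : Int} (l : List (Int × Int)) (st : List (List Int) × Finset (Int × Int))
    (hd : pyDims st.1 = (n, m)) :
    l.foldl stepA st = l.foldl (stepB n m) st := by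
  induction l generalizing st with
  | nil => rfl
  | cons a t ih =>
    simp only [List.foldl_cons]
    rw [← step_eq st a hd]
    exact ih _ (by rw [stepA_dims]; exact hd)

-- ===== VERDICT (by name: the statement is the Claim_ definition above) =====
theorem remove_islands_spec : Claim_equal_remove_islands := by
  intro matrix _ _
  unfold Spec_remove_islands remove_islands remove_islands_alt
  rw [fold_eq (n := (pyDims matrix).1) (m := (pyDims matrix).2) _ _ rfl]
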